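-- pv_equiv track=rewrite | github.com/ars0611/AtCoder | contest/ABC454/d.py | delBrk
-- ===== SOURCE A (Python) =====
-- def delBrk(s):
--     stack = []
--     for ch in s:
--         stack.append(ch)
--         if len(stack) >= 4 and ''.join(stack[-4:]) == '(xx)':
--             for _ in range(4):
--                 stack.pop()
--             for _ in range(2):
--                 stack.append('x')
--     return ''.join(stack)
-- ===== SOURCE B (Python) =====
-- def delBrk(s):
--     while '(xx)' in s:
--         s = s.replace('(xx)', 'xx')
--     return s
-- ===== Notes on version B (the rewrite author's own statement) =====
-- stated objective: simpler
-- what changed: Replaced the single left-to-right stack pass by a fixpoint rewrite: repeatedly replace every '(xx)' substring by 'xx' until none remains; the pattern cannot overlap itself, so the normal form is unique and equals the stack's result.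
import Mathlib
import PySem

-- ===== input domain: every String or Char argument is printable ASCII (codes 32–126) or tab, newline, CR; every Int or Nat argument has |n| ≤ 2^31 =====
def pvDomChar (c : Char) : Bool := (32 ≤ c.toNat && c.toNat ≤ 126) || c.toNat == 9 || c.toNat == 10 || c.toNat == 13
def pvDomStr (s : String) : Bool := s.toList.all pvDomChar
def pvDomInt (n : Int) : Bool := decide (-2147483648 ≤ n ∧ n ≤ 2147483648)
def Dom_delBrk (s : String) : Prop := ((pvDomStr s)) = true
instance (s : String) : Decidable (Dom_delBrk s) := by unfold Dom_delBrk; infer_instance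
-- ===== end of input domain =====

-- B replaces A's single left-to-right stack pass by a fixpoint rewrite (repeat s.replace('(xx)','xx')
-- until no '(xx)' remains); objective: simpler. Return values proved equal for every string.


-- ===== PORT A =====
-- one iteration of A's loop body: append ch, then collapse a trailing "(xx)" to "xx"
def delBrkStep (st : List Char) (ch : Char) : List Char :=
  let st' := st ++ [ch]
  if 4 ≤ st'.length ∧ PySem.List.slice st' (some (-4)) none = "(xx)".toList then
    -- four pops, then two pushes of 'x'
    st'.dropLast.dropLast.dropLast.dropLast ++ ['x'] ++ ['x']
  else st'

def delBrk (s : String) : String :=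
  String.ofList (s.toList.foldl delBrkStep [])

-- ===== PORT B =====
-- B's while-loop; the fuel argument only makes the recursion structurally total, it is
-- proved sufficient below (each replace removes at least two characters).
def delBrkLoop : Nat → String → String
  | 0, s => s
  | fuel + 1, s =>
      if PySem.Str.isIn "(xx)" s then delBrkLoop fuel (PySem.Str.replace s "(xx)" "xx")
      else s

def delBrk_alt (s : String) : String := delBrkLoop (s.toList.length + 1) s

-- ===== PRECONDITION & SPEC =====
def Spec_delBrk (s : String) (out : String) : Prop := out = delBrk_alt s
instance (s : String) (out : String) : Decidable (Spec_delBrk s out) := by unfold Spec_delBrk; infer_instance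

-- ===== CLAIM (what is proved, stated in full; the proofs are below) =====
def Claim_equal_delBrk : Prop := ∀ (s : String), Dom_delBrk s → Spec_delBrk s (delBrk s)

-- ===== LEMMAS AND PROOFS =====

-- abbreviation used only in the proofs
def pvF (st t : List Char) : List Char := t.foldl delBrkStep st

theorem pvSlice_last (st : List Char) (_h : 4 ≤ st.length) :
    PySem.List.slice st (some (-4)) none = st.drop (st.length - 4) := by
  simp [PySem.List.slice]

-- appending a char other than ')' never fires the collapse
theorem pvStep_nofire (st : List Char) (c : Char) (hc : c ≠ ')') :
    delBrkStep st c = st ++ [c] := by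
  unfold delBrkStep
  simp only []
  split
  · rename_i h
    obtain ⟨h4, heq⟩ := h
    rw [pvSlice_last _ h4] at heq
    exfalso
    have hlast : ((st ++ [c]).drop ((st ++ [c]).length - 4)).getLast? = some c := by
      rw [List.getLast?_drop, if_neg (by omega)]
      simp
    rw [heq] at hlast
    have h2 : ("(xx)".toList : List Char).getLast? = some ')' := by decide
    rw [h2] at hlast
    exact hc (Option.some.inj hlast).symm
  · rfl

theorem pvStep_fire (st : List Char) :
    delBrkStep (st ++ ['(', 'x', 'x']) ')' = st ++ ['x', 'x'] := by
  unfold delBrkStep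
  have h4 : 4 ≤ (st ++ ['(', 'x', 'x'] ++ [')']).length := by simp
  rw [if_pos]
  · simp [List.dropLast_append_of_ne_nil]
  · refine ⟨h4, ?_⟩
    rw [pvSlice_last _ h4]
    simp

-- a rewrite step "(xx)" → "xx" anywhere does not change A's fold result
theorem pvF_rewrite (st v : List Char) :
    pvF st ("(xx)".toList ++ v) = pvF st ("xx".toList ++ v) := by
  show pvF st ('(' :: 'x' :: 'x' :: ')' :: v) = pvF st ('x' :: 'x' :: v)
  unfold pvF
  simp only [List.foldl_cons]
  rw [pvStep_nofire st '(' (by decide), pvStep_nofire _ 'x' (by decide),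
      pvStep_nofire _ 'x' (by decide)]
  rw [show st ++ ['('] ++ ['x'] ++ ['x'] = st ++ ['(', 'x', 'x'] by simp]
  rw [pvStep_fire st,
      pvStep_nofire st 'x' (by decide), pvStep_nofire _ 'x' (by decide)]
  simp

theorem pvF_append (st a b : List Char) : pvF st (a ++ b) = pvF (pvF st a) b := by
  unfold pvF; exact List.foldl_append

-- A is invariant under one rewrite of "(xx)" to "xx"
theorem pvF_rw (u v : List Char) :
    pvF [] (u ++ "(xx)".toList ++ v) = pvF [] (u ++ "xx".toList ++ v) := by
  calc pvF [] (u ++ "(xx)".toList ++ v)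
      = pvF (pvF [] u) ("(xx)".toList ++ v) := by
        rw [List.append_assoc]; exact pvF_append [] u _
    _ = pvF (pvF [] u) ("xx".toList ++ v) := pvF_rewrite _ _
    _ = pvF [] (u ++ "xx".toList ++ v) := by
        rw [List.append_assoc]; exact (pvF_append [] u _).symm

-- on pattern-free input A is the identity
theorem pvF_id (t : List Char) : ∀ st, ¬ ("(xx)".toList <:+: st ++ t) → pvF st t = st ++ t := by
  induction t with
  | nil => intro st _; simp [pvF]
  | cons c t ih =>
    intro st h
    have hstep : delBrkStep st c = st ++ [c] := by
      unfold delBrkStep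
      simp only []
      rw [if_neg]
      intro ⟨h4, heq⟩
      apply h
      rw [pvSlice_last _ h4] at heq
      have : "(xx)".toList <:+ st ++ [c] := heq ▸ List.drop_suffix _ _
      refine this.isInfix.trans ?_
      rw [List.append_cons st c t]
      exact (List.prefix_append _ _).isInfix
    show pvF (delBrkStep st c) t = st ++ c :: t
    rw [hstep]
    have h' : ¬ ("(xx)".toList <:+: (st ++ [c]) ++ t) := by
      rw [← List.append_cons]; exact h
    have := ih (st ++ [c]) h'
    rw [this, List.append_assoc]; simp

-- A's fold is invariant under Python's replace-all of "(xx)" by "xx"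
theorem pvF_go (fuel : Nat) : ∀ l acc,
    pvF [] (PySem.Chars.replace.go "(xx)".toList "xx".toList fuel l acc) =
    pvF [] (acc.reverse ++ l) := by
  induction fuel with
  | zero => intro l acc; simp [PySem.Chars.replace.go]
  | succ fuel ih =>
    intro l acc
    match l with
    | [] => simp [PySem.Chars.replace.go]
    | c :: t =>
      rw [PySem.Chars.replace.go]
      split
      · rename_i hpre
        obtain ⟨l', hl'⟩ := List.isPrefixOf_iff_prefix.mp hpre
        rw [ih]
        have hdrop : List.drop "(xx)".toList.length (c :: t) = l' := by
          rw [← hl']; simp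
        rw [hdrop, ← hl']
        simp only [List.reverse_append, List.reverse_reverse]
        rw [← List.append_assoc acc.reverse "(xx)".toList l']
        exact (pvF_rw acc.reverse l').symm
      · rw [ih]
        simp

theorem pvF_replace (t : List Char) :
    pvF [] (PySem.Chars.replace t "(xx)".toList "xx".toList) = pvF [] t := by
  rw [PySem.Chars.replace]
  simp only [List.isEmpty_iff]
  rw [if_neg (by simp)]
  simpa using pvF_go t.length t []

-- replace removes at least two characters whenever the pattern occurs
theorem pvGo_len (fuel : Nat) : ∀ l acc, l.length ≤ fuel →
    (PySem.Chars.replace.go "(xx)".toList "xx".toList fuel l acc).length ≤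
      acc.length + l.length ∧
    ("(xx)".toList <:+: l →
      (PySem.Chars.replace.go "(xx)".toList "xx".toList fuel l acc).length + 2 ≤
        acc.length + l.length) := by
  induction fuel with
  | zero =>
    intro l acc hl
    cases l with
    | nil =>
      exact ⟨by simp [PySem.Chars.replace.go],
        fun h => absurd (List.infix_nil.mp h) (by decide)⟩
    | cons c t => exact absurd hl (by simp)
  | succ fuel ih =>
    intro l acc hl
    match l with
    | [] =>
      exact ⟨by simp [PySem.Chars.replace.go],
        fun h => absurd (List.infix_nil.mp h) (by decide)⟩
    | c :: t =>
      rw [PySem.Chars.replace.go]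
      split
      · rename_i hpre
        obtain ⟨l', hl'⟩ := List.isPrefixOf_iff_prefix.mp hpre
        have hdrop : List.drop "(xx)".toList.length (c :: t) = l' := by
          rw [← hl']; simp
        have hlen : (c :: t).length = l'.length + 4 := by rw [← hl']; simp
        rw [hdrop]
        have hfuel : l'.length ≤ fuel := by
          simp only [List.length_cons] at hl hlen; omega
        have hb := (ih l' ("xx".toList.reverse ++ acc) hfuel).1
        have hacc : ("xx".toList.reverse ++ acc).length = acc.length + 2 := by simp
        exact ⟨by omega, fun _ => by omega⟩
      · rename_i hpre
        have hfuel : t.length ≤ fuel := by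
          simp only [List.length_cons] at hl; omega
        have h1 := (ih t (c :: acc) hfuel).1
        have hacc : (c :: acc).length = acc.length + 1 := by simp
        have hlen : (c :: t).length = t.length + 1 := by simp
        constructor
        · omega
        · intro hinf
          have hinf' : "(xx)".toList <:+: t := by
            rcases List.infix_cons_iff.mp hinf with h | h
            · exact absurd (List.isPrefixOf_iff_prefix.mpr h) (by simpa using hpre)
            · exact h
          have h2 := (ih t (c :: acc) hfuel).2 hinf'
          omega

theorem pvReplace_len (t : List Char) (h : "(xx)".toList <:+: t) :
    (PySem.Chars.replace t "(xx)".toList "xx".toList).length + 2 ≤ t.length := by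
  rw [PySem.Chars.replace]
  simp only [List.isEmpty_iff]
  rw [if_neg (by simp)]
  simpa using (pvGo_len t.length t [] le_rfl).2 h

-- with fuel > length, the loop reaches a pattern-free string
theorem pvLoop_free (fuel : Nat) : ∀ s : String, s.toList.length < fuel →
    ¬ ("(xx)".toList <:+: (delBrkLoop fuel s).toList) := by
  induction fuel with
  | zero => intro s h; omega
  | succ fuel ih =>
    intro s h
    rw [delBrkLoop]
    split
    · rename_i hin
      have hinf : "(xx)".toList <:+: s.toList :=
        (PySem.Str.isIn_iff_infix _ _).mp hin
      apply ih
      rw [PySem.Str.toList_replace]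
      have := pvReplace_len s.toList hinf
      omega
    · rename_i hin
      intro hc
      exact hin ((PySem.Str.isIn_iff_infix _ _).mpr hc)

-- A's fold is invariant across the whole loop
theorem pvLoop_inv (fuel : Nat) : ∀ s : String,
    pvF [] (delBrkLoop fuel s).toList = pvF [] s.toList := by
  induction fuel with
  | zero => intro s; rfl
  | succ fuel ih =>
    intro s
    rw [delBrkLoop]
    split
    · rw [ih, PySem.Str.toList_replace, pvF_replace]
    · rfl

-- ===== VERDICT (by name: the statement is the Claim_ definition above) =====
theorem delBrk_spec : Claim_equal_delBrk := by
  intro s _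
  show delBrk s = delBrk_alt s
  unfold delBrk delBrk_alt
  have h1 : pvF [] (delBrkLoop (s.toList.length + 1) s).toList = pvF [] s.toList :=
    pvLoop_inv _ s
  have h2 : pvF [] (delBrkLoop (s.toList.length + 1) s).toList =
      (delBrkLoop (s.toList.length + 1) s).toList := by
    simpa using pvF_id (delBrkLoop (s.toList.length + 1) s).toList []
      (by simpa using pvLoop_free (s.toList.length + 1) s (Nat.lt_succ_self _))
  show String.ofList (pvF [] s.toList) = _
  rw [← h1, h2, String.ofList_toList]
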